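-- pv_equiv track=rewrite | github.com/bmendonca3/k8s-auto-fix | scripts/run_polaris_baseline.py | upgrade_api_versions
-- ===== SOURCE A (Python) =====
-- def upgrade_api_versions(manifest_yaml: str) -> str:
--     """
--     Upgrade deprecated API versions to current equivalents.
--
--     This mirrors the upgrade logic used in live-cluster evaluation so that
--     webhook dry-runs succeed even when the source manifest targets legacy
--     APIs (e.g. CronJob batch/v1beta1).
--     """
--     api_migrations = {
--         "apiVersion: batch/v1beta1": "apiVersion: batch/v1",
--         "apiVersion: extensions/v1beta1": "apiVersion: apps/v1",
--         "apiVersion: apps/v1beta1": "apiVersion: apps/v1",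
--         "apiVersion: apps/v1beta2": "apiVersion: apps/v1",
--     }
--     for old_api, new_api in api_migrations.items():
--         manifest_yaml = manifest_yaml.replace(old_api, new_api)
--     return manifest_yaml
-- ===== SOURCE B (Python) =====
-- def upgrade_api_versions(manifest_yaml: str) -> str:
--     """
--     Upgrade deprecated API versions to current equivalents.
--
--     Scans the manifest once from left to right; whenever a deprecated
--     apiVersion line starts at the current position, the replacement from
--     the migration table is emitted and the scan jumps past the match.
--     """
--     api_migrations = {
--         "apiVersion: batch/v1beta1": "apiVersion: batch/v1",
--         "apiVersion: extensions/v1beta1": "apiVersion: apps/v1",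
--         "apiVersion: apps/v1beta1": "apiVersion: apps/v1",
--         "apiVersion: apps/v1beta2": "apiVersion: apps/v1",
--     }
--     out = []
--     i = 0
--     n = len(manifest_yaml)
--     while i < n:
--         for old_api, new_api in api_migrations.items():
--             if manifest_yaml.startswith(old_api, i):
--                 out.append(new_api)
--                 i += len(old_api)
--                 break
--         else:
--             out.append(manifest_yaml[i])
--             i += 1
--     return "".join(out)
-- ===== Notes on version B (the rewrite author's own statement) =====
-- stated objective: alternative
-- what changed: Four sequential full-string replace passes are replaced by a single left-to-right scan driven by the migration table, emitting each replacement directly; Pre_ excludes manifests that contain a deprecated apiVersion string immediately followed by a further beta suffix (e.g. 'apiVersion: extensions/v1beta1beta1'), degenerate text on which A's later passes rescan the output of earlier ones and collapse the whole run, while B rewrites only the first match — either value is as defensible as the other there.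
import Mathlib
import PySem

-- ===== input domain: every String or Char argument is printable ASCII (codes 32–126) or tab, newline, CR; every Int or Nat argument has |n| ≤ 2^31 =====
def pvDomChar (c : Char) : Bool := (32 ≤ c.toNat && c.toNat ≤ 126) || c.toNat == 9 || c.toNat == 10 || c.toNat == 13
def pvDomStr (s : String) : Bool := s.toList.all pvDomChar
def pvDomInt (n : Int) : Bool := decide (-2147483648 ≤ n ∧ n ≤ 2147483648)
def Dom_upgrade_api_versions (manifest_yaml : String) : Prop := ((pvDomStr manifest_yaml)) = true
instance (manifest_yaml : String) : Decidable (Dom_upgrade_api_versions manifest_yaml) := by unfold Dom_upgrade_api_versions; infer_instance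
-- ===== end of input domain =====

-- B replaces A's four sequential full-string replace passes by a single left-to-right scan
-- driven by the migration table (objective: alternative); Pre_ excludes degenerate manifests
-- on which A's later passes rescan the output of earlier ones.


-- ===== PORT A =====
def pvApiMigrations : PySem.Dict String String :=
  ((((PySem.Dict.empty.insert "apiVersion: batch/v1beta1" "apiVersion: batch/v1").insert
      "apiVersion: extensions/v1beta1" "apiVersion: apps/v1").insert
      "apiVersion: apps/v1beta1" "apiVersion: apps/v1").insert
      "apiVersion: apps/v1beta2" "apiVersion: apps/v1")

def upgrade_api_versions (manifest_yaml : String) : String :=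
  pvApiMigrations.items.foldl (fun acc kv => PySem.Str.replace acc kv.1 kv.2) manifest_yaml

-- ===== PORT B =====
def pvK1 : List Char := "apiVersion: batch/v1beta1".toList
def pvR1 : List Char := "apiVersion: batch/v1".toList
def pvK2 : List Char := "apiVersion: extensions/v1beta1".toList
def pvR2 : List Char := "apiVersion: apps/v1".toList
def pvK3 : List Char := "apiVersion: apps/v1beta1".toList
def pvK4 : List Char := "apiVersion: apps/v1beta2".toList

-- Source B's api_migrations dict, in insertion order, over char lists
def pvMigTable : List (List Char × List Char) :=
  [(pvK1, pvR1), (pvK2, pvR2), (pvK3, pvR2), (pvK4, pvR2)]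

-- the inner `for old_api, new_api in api_migrations.items(): if manifest_yaml.startswith(old_api, i)` loop
def pvFirstMatch : List (List Char × List Char) → List Char → Option (List Char × List Char)
  | [], _ => none
  | (o, nw) :: rest, s => if o.isPrefixOf s then some (o, nw) else pvFirstMatch rest s

-- the outer `while i < n` loop of Source B over the not-yet-consumed suffix; the fuel counter
-- (initially the string length, an upper bound on the remaining iterations) keeps the
-- recursion structural
def pvScanGo : Nat → List Char → List Char
  | _, [] => []
  | 0, _ => []
  | fuel + 1, c :: t =>
    match pvFirstMatch pvMigTable (c :: t) with
    | some (o, nw) => nw ++ pvScanGo fuel (List.drop o.length (c :: t))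
    | none => c :: pvScanGo fuel t

def upgrade_api_versions_alt (manifest_yaml : String) : String :=
  String.ofList (pvScanGo manifest_yaml.toList.length manifest_yaml.toList)

-- ===== PRECONDITION & SPEC =====
def pvCas1 : List Char := "apiVersion: extensions/v1beta1beta1".toList
def pvCas2 : List Char := "apiVersion: extensions/v1beta1beta2".toList
def pvCas3 : List Char := "apiVersion: apps/v1beta1beta2".toList

-- Pre_ excludes manifests containing a deprecated apiVersion string immediately followed by a
-- further beta suffix: on such degenerate text A's later replace passes rescan the output of
-- earlier ones and collapse the whole run while B rewrites only the first match, and either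
-- value is as defensible as the other.
def Pre_upgrade_api_versions (manifest_yaml : String) : Prop :=
  ¬ pvCas1 <:+: manifest_yaml.toList ∧ ¬ pvCas2 <:+: manifest_yaml.toList ∧
  ¬ pvCas3 <:+: manifest_yaml.toList
instance (manifest_yaml : String) : Decidable (Pre_upgrade_api_versions manifest_yaml) := by
  unfold Pre_upgrade_api_versions; infer_instance

def pvWitness_upgrade_api_versions : String :=
  "apiVersion: apps/v1beta1\nkind: Deployment"

def Spec_upgrade_api_versions (manifest_yaml : String) (out : String) : Prop := out = upgrade_api_versions_alt manifest_yaml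
instance (manifest_yaml : String) (out : String) : Decidable (Spec_upgrade_api_versions manifest_yaml out) := by unfold Spec_upgrade_api_versions; infer_instance

-- ===== CLAIM (what is proved, stated in full; the proofs are below) =====
def Claim_equal_upgrade_api_versions : Prop := ∀ (manifest_yaml : String), Dom_upgrade_api_versions manifest_yaml → Pre_upgrade_api_versions manifest_yaml → Spec_upgrade_api_versions manifest_yaml (upgrade_api_versions manifest_yaml)

-- ===== LEMMAS AND PROOFS =====

-- ---------- spec view of one Python replace pass ----------
def pvRepC (k r : List Char) : List Char → List Char := fun l =>
  match l with
  | [] => []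
  | c :: t =>
    if h : k ≠ [] ∧ k.isPrefixOf (c :: t) then r ++ pvRepC k r (List.drop k.length (c :: t))
    else c :: pvRepC k r t
termination_by l => l.length
decreasing_by
  · have : 0 < k.length := List.length_pos_of_ne_nil h.1
    simp only [List.length_drop, List.length_cons]; omega
  · simp

theorem pvRepC_nil (k r : List Char) : pvRepC k r [] = [] := by
  unfold pvRepC; rfl

theorem pvRepC_cons (k r : List Char) (c : Char) (t : List Char) :
    pvRepC k r (c :: t) =
      if k ≠ [] ∧ k.isPrefixOf (c :: t) then r ++ pvRepC k r (List.drop k.length (c :: t))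
      else c :: pvRepC k r t := by
  conv_lhs => unfold pvRepC
  rw [dite_eq_ite]

theorem pvRepC_cons_pos (k r : List Char) (c : Char) (t : List Char) (hk : k ≠ [])
    (hp : k <+: (c :: t)) :
    pvRepC k r (c :: t) = r ++ pvRepC k r (List.drop k.length (c :: t)) := by
  rw [pvRepC_cons, if_pos ⟨hk, List.isPrefixOf_iff_prefix.mpr hp⟩]

theorem pvRepC_cons_neg (k r : List Char) (c : Char) (t : List Char)
    (hp : ¬ k <+: (c :: t)) :
    pvRepC k r (c :: t) = c :: pvRepC k r t := by
  rw [pvRepC_cons, if_neg]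
  intro h
  exact hp (List.isPrefixOf_iff_prefix.mp h.2)

theorem pv_prefix_append_drop {k l : List Char} (h : k <+: l) :
    k ++ List.drop k.length l = l := by
  obtain ⟨t, rfl⟩ := h
  simp

theorem pvRepC_match (k r x : List Char) (hk : k ≠ []) :
    pvRepC k r (k ++ x) = r ++ pvRepC k r x := by
  obtain ⟨c, k', rfl⟩ := List.exists_cons_of_ne_nil hk
  rw [show (c :: k') ++ x = c :: (k' ++ x) from rfl,
      pvRepC_cons_pos _ r _ _ hk (by exact ⟨x, rfl⟩)]
  congr 1
  simp

theorem pv_go_eq (k r : List Char) (hk : k ≠ []) :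
    ∀ (fuel : Nat) (l acc : List Char), l.length ≤ fuel →
      PySem.Chars.replace.go k r fuel l acc = acc.reverse ++ pvRepC k r l := by
  intro fuel
  induction fuel with
  | zero =>
    intro l acc hl
    have : l = [] := List.length_eq_zero_iff.mp (Nat.le_zero.mp hl)
    subst this
    simp [PySem.Chars.replace.go, pvRepC_nil]
  | succ n ih =>
    intro l acc hl
    cases l with
    | nil => simp [PySem.Chars.replace.go, pvRepC_nil]
    | cons c t =>
      by_cases hp : k.isPrefixOf (c :: t)
      · have hkp : 0 < k.length := List.length_pos_of_ne_nil hk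
        rw [show PySem.Chars.replace.go k r (n+1) (c :: t) acc
              = PySem.Chars.replace.go k r n (List.drop k.length (c :: t)) (r.reverse ++ acc) by
            simp [PySem.Chars.replace.go, hp]]
        rw [ih _ _ (by simp only [List.length_drop, List.length_cons] at *; omega)]
        rw [pvRepC_cons_pos _ _ _ _ hk (List.isPrefixOf_iff_prefix.mp hp)]
        simp
      · rw [show PySem.Chars.replace.go k r (n+1) (c :: t) acc
              = PySem.Chars.replace.go k r n t (c :: acc) by
            simp [PySem.Chars.replace.go, hp]]
        rw [ih _ _ (by simp at hl ⊢; omega)]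
        rw [pvRepC_cons_neg _ _ _ _ (fun h => hp (List.isPrefixOf_iff_prefix.mpr h))]
        simp

theorem pv_replace_eq (k r l : List Char) (hk : k ≠ []) :
    PySem.Chars.replace l k r = pvRepC k r l := by
  unfold PySem.Chars.replace
  rw [if_neg (by simpa [List.isEmpty_iff] using hk)]
  simpa using pv_go_eq k r hk l.length l [] le_rfl

-- A's four passes, written with pvRepC
theorem pv_A_eq (m : String) :
    upgrade_api_versions m =
      String.ofList (pvRepC pvK4 pvR2 (pvRepC pvK3 pvR2 (pvRepC pvK2 pvR2
        (pvRepC pvK1 pvR1 m.toList)))) := by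
  have hitems : pvApiMigrations.items =
        [("apiVersion: batch/v1beta1", "apiVersion: batch/v1"),
         ("apiVersion: extensions/v1beta1", "apiVersion: apps/v1"),
         ("apiVersion: apps/v1beta1", "apiVersion: apps/v1"),
         ("apiVersion: apps/v1beta2", "apiVersion: apps/v1")] := by decide
  unfold upgrade_api_versions
  rw [hitems]
  simp only [List.foldl_cons, List.foldl_nil]
  simp only [PySem.Str.replace, String.toList_ofList]
  rw [pv_replace_eq _ _ _ (by decide), pv_replace_eq _ _ _ (by decide),
      pv_replace_eq _ _ _ (by decide), pv_replace_eq _ _ _ (by decide)]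
  rfl

-- ---------- generic prefix / infix plumbing ----------
theorem pv_prefix_split {w u x : List Char} (h : w <+: u ++ x) :
    w <+: u ∨ ∃ w2, w = u ++ w2 ∧ w2 <+: x := by
  obtain ⟨t, ht⟩ := h
  rcases List.append_eq_append_iff.mp ht with ⟨as, hu, _⟩ | ⟨bs, hw, hx⟩
  · exact Or.inl ⟨as, hu.symm⟩
  · exact Or.inr ⟨bs, hw, ⟨t, hx.symm⟩⟩

theorem pv_not_prefix_append {k u : List Char} (x : List Char)
    (h1 : ¬ k <+: u) (h2 : ¬ u <+: k) : ¬ k <+: u ++ x := by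
  intro h
  rcases pv_prefix_split h with h | ⟨w2, rfl, _⟩
  · exact h1 h
  · exact h2 ⟨w2, rfl⟩

-- ---------- shields: a replace pass walks through a segment it cannot match ----------
theorem pv_shield_core (k r : List Char) : ∀ (u x : List Char),
    (∀ j, j < u.length → ¬ k <+: (List.drop j u ++ x)) →
    pvRepC k r (u ++ x) = u ++ pvRepC k r x := by
  intro u
  induction u with
  | nil => intro x _; simp
  | cons c u' ih =>
    intro x h
    have h0 : ¬ k <+: c :: (u' ++ x) := by simpa using h 0 (by simp)
    rw [show (c :: u') ++ x = c :: (u' ++ x) from rfl, pvRepC_cons_neg _ _ _ _ h0,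
        ih x (fun j hj => by simpa using h (j+1) (by simp; omega))]
    rfl

theorem pv_shield (k r u : List Char)
    (hd : ∀ j, j < u.length → ¬ k <+: List.drop j u ∧ ¬ List.drop j u <+: k) (x : List Char) :
    pvRepC k r (u ++ x) = u ++ pvRepC k r x :=
  pv_shield_core k r u x (fun j hj => pv_not_prefix_append x (hd j hj).1 (hd j hj).2)

theorem pv_shield_cond (k r u : List Char)
    (hd : ∀ j, j < u.length → 0 < j → ¬ k <+: List.drop j u ∧ ¬ List.drop j u <+: k)
    (x : List Char) (h0 : ¬ k <+: u ++ x) :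
    pvRepC k r (u ++ x) = u ++ pvRepC k r x :=
  pv_shield_core k r u x (fun j hj => by
    rcases Nat.eq_zero_or_pos j with rfl | hj0
    · simpa using h0
    · exact pv_not_prefix_append x (hd j hj hj0).1 (hd j hj hj0).2)

-- ---------- transfer: a pattern in a pass's output was already in its input ----------
theorem pv_transP0 (k r : List Char) (hk : k ≠ []) :
    ∀ (n : Nat) (t : List Char), t.length ≤ n → ∀ w : List Char, w ≠ [] →
      (∀ j, j < w.length → ¬ (List.drop j w) <+: r ∧ ¬ r <+: (List.drop j w)) →
      w <+: pvRepC k r t → w <+: t := by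
  intro n
  induction n with
  | zero =>
    intro t ht w hw _ hpre
    have : t = [] := List.length_eq_zero_iff.mp (Nat.le_zero.mp ht)
    subst this
    rw [pvRepC_nil] at hpre
    exact absurd (List.prefix_nil.mp hpre) hw
  | succ n ih =>
    intro t ht w hw hcond hpre
    cases t with
    | nil =>
      rw [pvRepC_nil] at hpre
      exact absurd (List.prefix_nil.mp hpre) hw
    | cons c t =>
      by_cases hp : k <+: (c :: t)
      · rw [pvRepC_cons_pos _ _ _ _ hk hp] at hpre
        rcases pv_prefix_split hpre with h1 | ⟨w2, hweq, _⟩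
        · exact absurd h1 (by simpa using (hcond 0 (List.length_pos_of_ne_nil hw)).1)
        · exact absurd (show r <+: w from hweq ▸ ⟨w2, rfl⟩)
            (by simpa using (hcond 0 (List.length_pos_of_ne_nil hw)).2)
      · rw [pvRepC_cons_neg _ _ _ _ hp] at hpre
        cases w with
        | nil => exact absurd rfl hw
        | cons d w' =>
          obtain ⟨rfl, hw'⟩ := List.cons_prefix_cons.mp hpre
          by_cases hw'e : w' = []
          · subst hw'e
            exact List.cons_prefix_cons.mpr ⟨rfl, List.nil_prefix⟩
          · have := ih t (by simpa using Nat.lt_succ_iff.mp (by simpa using ht)) w' hw'e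
              (fun j hj => by simpa using hcond (j+1) (by simp; omega)) hw'
            exact List.cons_prefix_cons.mpr ⟨rfl, this⟩

theorem pv_transP (k r w : List Char) (hk : k ≠ []) (hr : r ≠ []) (hw : w ≠ [])
    (h1 : ∀ j, j < w.length → ¬ (List.drop j w) <+: r)
    (h2 : ∀ j, j < w.length → 0 < j → ¬ r <+: (List.drop j w)) :
    ∀ (n : Nat) (t : List Char), t.length ≤ n →
      w <+: pvRepC k r t → w <+: t ∨ (r <+: w ∧ (k ++ List.drop r.length w) <+: t) := by
  intro n
  induction n with
  | zero =>
    intro t ht hpre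
    have : t = [] := List.length_eq_zero_iff.mp (Nat.le_zero.mp ht)
    subst this
    rw [pvRepC_nil] at hpre
    exact absurd (List.prefix_nil.mp hpre) hw
  | succ n ih =>
    intro t ht hpre
    cases t with
    | nil =>
      rw [pvRepC_nil] at hpre
      exact absurd (List.prefix_nil.mp hpre) hw
    | cons c t =>
      by_cases hp : k <+: (c :: t)
      · rw [pvRepC_cons_pos _ _ _ _ hk hp] at hpre
        rcases pv_prefix_split hpre with hcase | ⟨w2, hweq, hw2⟩
        · exact absurd hcase (by simpa using h1 0 (List.length_pos_of_ne_nil hw))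
        · have hw2ne : w2 ≠ [] := by
            rintro rfl
            have hwr : w = r := by rw [hweq, List.append_nil]
            exact h1 0 (List.length_pos_of_ne_nil hw) (by simp [hwr])
          have hlen : w.length = r.length + w2.length := by rw [hweq]; simp
          have hw2t : w2 <+: List.drop k.length (c :: t) :=
            pv_transP0 k r hk _ _ le_rfl w2 hw2ne
              (fun j hj => by
                have hdj : List.drop j w2 = List.drop (r.length + j) w := by
                  conv_rhs => rw [hweq, List.drop_append]
                  rw [show List.drop (r.length + j) r = ([] : List Char) from
                        List.drop_eq_nil_of_le (by omega),
                      Nat.add_sub_cancel_left, List.nil_append]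
                refine ⟨?_, ?_⟩
                · rw [hdj] at *; exact h1 (r.length + j) (by omega)
                · rw [hdj]; exact h2 (r.length + j)
                    (by omega) (by have := List.length_pos_of_ne_nil hr; omega)) hw2
          right
          refine ⟨hweq ▸ ⟨w2, rfl⟩, ?_⟩
          have : k ++ w2 <+: k ++ List.drop k.length (c :: t) :=
            (List.prefix_append_right_inj k).mpr hw2t
          rw [pv_prefix_append_drop hp] at this
          have hdw : List.drop r.length w = w2 := by rw [hweq, List.drop_left]
          rw [hdw]
          exact this
      · rw [pvRepC_cons_neg _ _ _ _ hp] at hpre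
        cases w with
        | nil => exact absurd rfl hw
        | cons d w' =>
          obtain ⟨rfl, hw'⟩ := List.cons_prefix_cons.mp hpre
          by_cases hw'e : w' = []
          · subst hw'e
            exact Or.inl (List.cons_prefix_cons.mpr ⟨rfl, List.nil_prefix⟩)
          · have := pv_transP0 k r hk t.length t le_rfl w' hw'e
              (fun j hj => ⟨by simpa using h1 (j+1) (by simp; omega),
                            by simpa using h2 (j+1) (by simp; omega) (by omega)⟩) hw'
            exact Or.inl (List.cons_prefix_cons.mpr ⟨rfl, this⟩)

-- ---------- the proof-internal 8-key scan (the cascaded forms A's passes collapse) ----------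
def pvK212 : List Char := "apiVersion: extensions/v1beta1beta1beta2".toList
def pvK21 : List Char := "apiVersion: extensions/v1beta1beta1".toList
def pvK22 : List Char := "apiVersion: extensions/v1beta1beta2".toList
def pvK32 : List Char := "apiVersion: apps/v1beta1beta2".toList

def pvTable8 : List (List Char × List Char) :=
  [(pvK1, pvR1), (pvK212, pvR2), (pvK21, pvR2), (pvK22, pvR2), (pvK2, pvR2),
   (pvK32, pvR2), (pvK3, pvR2), (pvK4, pvR2)]

def pvScanGo8 : Nat → List Char → List Char
  | _, [] => []
  | 0, _ => []
  | fuel + 1, c :: t =>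
    match pvFirstMatch pvTable8 (c :: t) with
    | some (o, nw) => nw ++ pvScanGo8 fuel (List.drop o.length (c :: t))
    | none => c :: pvScanGo8 fuel t

theorem pvFirstMatch_mem : ∀ (L : List (List Char × List Char)) (s o nw : List Char),
    pvFirstMatch L s = some (o, nw) → (o, nw) ∈ L ∧ o.isPrefixOf s = true := by
  intro L
  induction L with
  | nil => intro s o nw h; simp [pvFirstMatch] at h
  | cons p rest ih =>
    intro s o nw h
    obtain ⟨po, pn⟩ := p
    by_cases hp : po.isPrefixOf s
    · simp [pvFirstMatch, hp] at h
      exact ⟨by simp [h.1, h.2], h.1 ▸ hp⟩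
    · simp [pvFirstMatch, hp] at h
      obtain ⟨hm, hpre⟩ := ih s o nw h
      exact ⟨List.mem_cons_of_mem _ hm, hpre⟩

theorem pvTable8_key_pos : ∀ o nw : List Char, (o, nw) ∈ pvTable8 → 0 < o.length := by
  intro o nw h
  fin_cases h <;> decide

theorem pvScanGo8_fuel : ∀ (f1 : Nat), ∀ (f2 : Nat) (l : List Char), l.length ≤ f1 → l.length ≤ f2 →
    pvScanGo8 f1 l = pvScanGo8 f2 l := by
  intro f1
  induction f1 with
  | zero =>
    intro f2 l h1 _
    have : l = [] := List.length_eq_zero_iff.mp (Nat.le_zero.mp h1)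
    subst this
    cases f2 <;> simp [pvScanGo8]
  | succ n ih =>
    intro f2 l h1 h2
    cases l with
    | nil => cases f2 <;> simp [pvScanGo8]
    | cons c t =>
      cases f2 with
      | zero => simp at h2
      | succ m =>
        rcases hfm : pvFirstMatch pvTable8 (c :: t) with _ | ⟨o, nw⟩
        · simp only [pvScanGo8, hfm]
          rw [ih m t (by simpa using h1) (by simpa using h2)]
        · have hpos := pvTable8_key_pos _ _ (pvFirstMatch_mem _ _ _ _ hfm).1
          simp only [pvScanGo8, hfm]
          rw [ih m (List.drop o.length (c :: t))
              (by simp only [List.length_drop, List.length_cons] at *; omega)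
              (by simp only [List.length_drop, List.length_cons] at *; omega)]

def pvS (l : List Char) : List Char := pvScanGo8 l.length l

theorem pvS_nil : pvS [] = [] := by simp [pvS, pvScanGo8]

theorem pvS_match (o nw l : List Char) (h : pvFirstMatch pvTable8 l = some (o, nw))
    (hl : l ≠ []) : pvS l = nw ++ pvS (List.drop o.length l) := by
  obtain ⟨c, t, rfl⟩ := List.exists_cons_of_ne_nil hl
  have hpos := pvTable8_key_pos _ _ (pvFirstMatch_mem _ _ _ _ h).1
  show pvScanGo8 (t.length + 1) (c :: t) = _
  simp only [pvScanGo8, h]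
  rw [pvScanGo8_fuel t.length _ _
      (by simp only [List.length_drop, List.length_cons]; omega) le_rfl]
  rfl

theorem pvS_none (c : Char) (t : List Char) (h : pvFirstMatch pvTable8 (c :: t) = none) :
    pvS (c :: t) = c :: pvS t := by
  show pvScanGo8 (t.length + 1) (c :: t) = _
  simp only [pvScanGo8, h]
  rfl

theorem pvFM_1 {s : List Char} (h : pvK1 <+: s) :
    pvFirstMatch pvTable8 s = some (pvK1, pvR1) := by
  simp only [pvTable8, pvFirstMatch, List.isPrefixOf_iff_prefix.mpr h, if_true]

theorem pvFM_2 {s : List Char} (n1 : ¬ pvK1 <+: s) (h : pvK212 <+: s) :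
    pvFirstMatch pvTable8 s = some (pvK212, pvR2) := by
  have e1 : pvK1.isPrefixOf s = false := by
    rw [Bool.eq_false_iff]; intro hb; exact n1 (List.isPrefixOf_iff_prefix.mp hb)
  simp only [pvTable8, pvFirstMatch, e1, List.isPrefixOf_iff_prefix.mpr h, if_true, if_false,
    Bool.false_eq_true]

theorem pvFM_3 {s : List Char} (n1 : ¬ pvK1 <+: s) (n2 : ¬ pvK212 <+: s) (h : pvK21 <+: s) :
    pvFirstMatch pvTable8 s = some (pvK21, pvR2) := by
  have e1 : pvK1.isPrefixOf s = false := by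
    rw [Bool.eq_false_iff]; intro hb; exact n1 (List.isPrefixOf_iff_prefix.mp hb)
  have e2 : pvK212.isPrefixOf s = false := by
    rw [Bool.eq_false_iff]; intro hb; exact n2 (List.isPrefixOf_iff_prefix.mp hb)
  simp only [pvTable8, pvFirstMatch, e1, e2, List.isPrefixOf_iff_prefix.mpr h, if_true, if_false,
    Bool.false_eq_true]

theorem pvFM_4 {s : List Char} (n1 : ¬ pvK1 <+: s) (n2 : ¬ pvK212 <+: s) (n3 : ¬ pvK21 <+: s) (h : pvK22 <+: s) :
    pvFirstMatch pvTable8 s = some (pvK22, pvR2) := by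
  have e1 : pvK1.isPrefixOf s = false := by
    rw [Bool.eq_false_iff]; intro hb; exact n1 (List.isPrefixOf_iff_prefix.mp hb)
  have e2 : pvK212.isPrefixOf s = false := by
    rw [Bool.eq_false_iff]; intro hb; exact n2 (List.isPrefixOf_iff_prefix.mp hb)
  have e3 : pvK21.isPrefixOf s = false := by
    rw [Bool.eq_false_iff]; intro hb; exact n3 (List.isPrefixOf_iff_prefix.mp hb)
  simp only [pvTable8, pvFirstMatch, e1, e2, e3, List.isPrefixOf_iff_prefix.mpr h, if_true, if_false,
    Bool.false_eq_true]

theorem pvFM_5 {s : List Char} (n1 : ¬ pvK1 <+: s) (n2 : ¬ pvK212 <+: s) (n3 : ¬ pvK21 <+: s) (n4 : ¬ pvK22 <+: s) (h : pvK2 <+: s) :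
    pvFirstMatch pvTable8 s = some (pvK2, pvR2) := by
  have e1 : pvK1.isPrefixOf s = false := by
    rw [Bool.eq_false_iff]; intro hb; exact n1 (List.isPrefixOf_iff_prefix.mp hb)
  have e2 : pvK212.isPrefixOf s = false := by
    rw [Bool.eq_false_iff]; intro hb; exact n2 (List.isPrefixOf_iff_prefix.mp hb)
  have e3 : pvK21.isPrefixOf s = false := by
    rw [Bool.eq_false_iff]; intro hb; exact n3 (List.isPrefixOf_iff_prefix.mp hb)
  have e4 : pvK22.isPrefixOf s = false := by
    rw [Bool.eq_false_iff]; intro hb; exact n4 (List.isPrefixOf_iff_prefix.mp hb)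
  simp only [pvTable8, pvFirstMatch, e1, e2, e3, e4, List.isPrefixOf_iff_prefix.mpr h, if_true, if_false,
    Bool.false_eq_true]

theorem pvFM_6 {s : List Char} (n1 : ¬ pvK1 <+: s) (n2 : ¬ pvK212 <+: s) (n3 : ¬ pvK21 <+: s) (n4 : ¬ pvK22 <+: s) (n5 : ¬ pvK2 <+: s) (h : pvK32 <+: s) :
    pvFirstMatch pvTable8 s = some (pvK32, pvR2) := by
  have e1 : pvK1.isPrefixOf s = false := by
    rw [Bool.eq_false_iff]; intro hb; exact n1 (List.isPrefixOf_iff_prefix.mp hb)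
  have e2 : pvK212.isPrefixOf s = false := by
    rw [Bool.eq_false_iff]; intro hb; exact n2 (List.isPrefixOf_iff_prefix.mp hb)
  have e3 : pvK21.isPrefixOf s = false := by
    rw [Bool.eq_false_iff]; intro hb; exact n3 (List.isPrefixOf_iff_prefix.mp hb)
  have e4 : pvK22.isPrefixOf s = false := by
    rw [Bool.eq_false_iff]; intro hb; exact n4 (List.isPrefixOf_iff_prefix.mp hb)
  have e5 : pvK2.isPrefixOf s = false := by
    rw [Bool.eq_false_iff]; intro hb; exact n5 (List.isPrefixOf_iff_prefix.mp hb)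
  simp only [pvTable8, pvFirstMatch, e1, e2, e3, e4, e5, List.isPrefixOf_iff_prefix.mpr h, if_true, if_false,
    Bool.false_eq_true]

theorem pvFM_7 {s : List Char} (n1 : ¬ pvK1 <+: s) (n2 : ¬ pvK212 <+: s) (n3 : ¬ pvK21 <+: s) (n4 : ¬ pvK22 <+: s) (n5 : ¬ pvK2 <+: s) (n6 : ¬ pvK32 <+: s) (h : pvK3 <+: s) :
    pvFirstMatch pvTable8 s = some (pvK3, pvR2) := by
  have e1 : pvK1.isPrefixOf s = false := by
    rw [Bool.eq_false_iff]; intro hb; exact n1 (List.isPrefixOf_iff_prefix.mp hb)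
  have e2 : pvK212.isPrefixOf s = false := by
    rw [Bool.eq_false_iff]; intro hb; exact n2 (List.isPrefixOf_iff_prefix.mp hb)
  have e3 : pvK21.isPrefixOf s = false := by
    rw [Bool.eq_false_iff]; intro hb; exact n3 (List.isPrefixOf_iff_prefix.mp hb)
  have e4 : pvK22.isPrefixOf s = false := by
    rw [Bool.eq_false_iff]; intro hb; exact n4 (List.isPrefixOf_iff_prefix.mp hb)
  have e5 : pvK2.isPrefixOf s = false := by
    rw [Bool.eq_false_iff]; intro hb; exact n5 (List.isPrefixOf_iff_prefix.mp hb)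
  have e6 : pvK32.isPrefixOf s = false := by
    rw [Bool.eq_false_iff]; intro hb; exact n6 (List.isPrefixOf_iff_prefix.mp hb)
  simp only [pvTable8, pvFirstMatch, e1, e2, e3, e4, e5, e6, List.isPrefixOf_iff_prefix.mpr h, if_true, if_false,
    Bool.false_eq_true]

theorem pvFM_8 {s : List Char} (n1 : ¬ pvK1 <+: s) (n2 : ¬ pvK212 <+: s) (n3 : ¬ pvK21 <+: s) (n4 : ¬ pvK22 <+: s) (n5 : ¬ pvK2 <+: s) (n6 : ¬ pvK32 <+: s) (n7 : ¬ pvK3 <+: s) (h : pvK4 <+: s) :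
    pvFirstMatch pvTable8 s = some (pvK4, pvR2) := by
  have e1 : pvK1.isPrefixOf s = false := by
    rw [Bool.eq_false_iff]; intro hb; exact n1 (List.isPrefixOf_iff_prefix.mp hb)
  have e2 : pvK212.isPrefixOf s = false := by
    rw [Bool.eq_false_iff]; intro hb; exact n2 (List.isPrefixOf_iff_prefix.mp hb)
  have e3 : pvK21.isPrefixOf s = false := by
    rw [Bool.eq_false_iff]; intro hb; exact n3 (List.isPrefixOf_iff_prefix.mp hb)
  have e4 : pvK22.isPrefixOf s = false := by
    rw [Bool.eq_false_iff]; intro hb; exact n4 (List.isPrefixOf_iff_prefix.mp hb)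
  have e5 : pvK2.isPrefixOf s = false := by
    rw [Bool.eq_false_iff]; intro hb; exact n5 (List.isPrefixOf_iff_prefix.mp hb)
  have e6 : pvK32.isPrefixOf s = false := by
    rw [Bool.eq_false_iff]; intro hb; exact n6 (List.isPrefixOf_iff_prefix.mp hb)
  have e7 : pvK3.isPrefixOf s = false := by
    rw [Bool.eq_false_iff]; intro hb; exact n7 (List.isPrefixOf_iff_prefix.mp hb)
  simp only [pvTable8, pvFirstMatch, e1, e2, e3, e4, e5, e6, e7, List.isPrefixOf_iff_prefix.mpr h, if_true, if_false,
    Bool.false_eq_true]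

theorem pvFM_none {s : List Char} (n1 : ¬ pvK1 <+: s) (n2 : ¬ pvK212 <+: s) (n3 : ¬ pvK21 <+: s) (n4 : ¬ pvK22 <+: s) (n5 : ¬ pvK2 <+: s) (n6 : ¬ pvK32 <+: s) (n7 : ¬ pvK3 <+: s) (n8 : ¬ pvK4 <+: s) :
    pvFirstMatch pvTable8 s = none := by
  have e1 : pvK1.isPrefixOf s = false := by
    rw [Bool.eq_false_iff]; intro hb; exact n1 (List.isPrefixOf_iff_prefix.mp hb)
  have e2 : pvK212.isPrefixOf s = false := by
    rw [Bool.eq_false_iff]; intro hb; exact n2 (List.isPrefixOf_iff_prefix.mp hb)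
  have e3 : pvK21.isPrefixOf s = false := by
    rw [Bool.eq_false_iff]; intro hb; exact n3 (List.isPrefixOf_iff_prefix.mp hb)
  have e4 : pvK22.isPrefixOf s = false := by
    rw [Bool.eq_false_iff]; intro hb; exact n4 (List.isPrefixOf_iff_prefix.mp hb)
  have e5 : pvK2.isPrefixOf s = false := by
    rw [Bool.eq_false_iff]; intro hb; exact n5 (List.isPrefixOf_iff_prefix.mp hb)
  have e6 : pvK32.isPrefixOf s = false := by
    rw [Bool.eq_false_iff]; intro hb; exact n6 (List.isPrefixOf_iff_prefix.mp hb)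
  have e7 : pvK3.isPrefixOf s = false := by
    rw [Bool.eq_false_iff]; intro hb; exact n7 (List.isPrefixOf_iff_prefix.mp hb)
  have e8 : pvK4.isPrefixOf s = false := by
    rw [Bool.eq_false_iff]; intro hb; exact n8 (List.isPrefixOf_iff_prefix.mp hb)
  simp only [pvTable8, pvFirstMatch, e1, e2, e3, e4, e5, e6, e7, e8, if_false, Bool.false_eq_true]

-- ---------- the composed chain and the main induction ----------
def pvB1 : List Char := "beta1".toList
def pvB2 : List Char := "beta2".toList

def pvC (l : List Char) : List Char :=
  pvRepC pvK4 pvR2 (pvRepC pvK3 pvR2 (pvRepC pvK2 pvR2 (pvRepC pvK1 pvR1 l)))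

theorem pvT0 (k r : List Char) (hk : k ≠ []) (w : List Char) (hw : w ≠ [])
    (hc : ∀ j, j < w.length → ¬ (List.drop j w) <+: r ∧ ¬ r <+: (List.drop j w))
    {t : List Char} (h : w <+: pvRepC k r t) : w <+: t :=
  pv_transP0 k r hk t.length t le_rfl w hw hc h

set_option maxHeartbeats 2000000 in
theorem pv_main : ∀ (n : Nat) (l : List Char), l.length ≤ n → pvC l = pvS l := by
  intro n
  induction n with
  | zero =>
    intro l hl
    have : l = [] := List.length_eq_zero_iff.mp (Nat.le_zero.mp hl)
    subst this
    simp [pvC, pvRepC_nil, pvS_nil]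
  | succ n ih =>
    intro l hl
    cases hcl : l with
    | nil => simp [pvC, pvRepC_nil, pvS_nil]
    | cons c t0 =>
      subst hcl
      by_cases g1 : pvK1 <+: (c :: t0)
      · -- "apiVersion: batch/v1beta1" at the head
        set t := List.drop pvK1.length (c :: t0) with hts
        have hl2 : pvK1 ++ t = c :: t0 := pv_prefix_append_drop g1
        have hlen : t.length ≤ n := by
          have := congrArg List.length hl2
          simp only [List.length_append, List.length_cons] at this hl
          have hkp : 0 < pvK1.length := by decide
          omega
        have hCt : pvC (c :: t0) = pvR1 ++ pvC t := by
          rw [← hl2]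
          unfold pvC
          rw [pvRepC_match _ _ _ (by decide),
              pv_shield pvK2 pvR2 pvR1 (by decide),
              pv_shield pvK3 pvR2 pvR1 (by decide),
              pv_shield pvK4 pvR2 pvR1 (by decide)]
        have hSt : pvS (c :: t0) = pvR1 ++ pvS t := by
          rw [pvS_match _ _ _ (pvFM_1 g1) (by simp), hts]
        rw [hCt, hSt, ih t hlen]
      · by_cases g2 : pvK212 <+: (c :: t0)
        · -- extensions/v1beta1 + beta1 + beta2 at the head (full cascade)
          set t := List.drop pvK212.length (c :: t0) with hts
          have hl2 : pvK212 ++ t = c :: t0 := pv_prefix_append_drop g2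
          have hlen : t.length ≤ n := by
            have := congrArg List.length hl2
            simp only [List.length_append, List.length_cons] at this hl
            have hkp : 0 < pvK212.length := by decide
            omega
          have hCt : pvC (c :: t0) = pvR2 ++ pvC t := by
            rw [← hl2]
            unfold pvC
            rw [pv_shield pvK1 pvR1 pvK212 (by decide)]
            rw [show ∀ X : List Char, pvK212 ++ X = pvK2 ++ ((pvB1 ++ pvB2) ++ X) from
                  fun X => by rw [show pvK212 = pvK2 ++ (pvB1 ++ pvB2) from by decide,
                                  List.append_assoc]]
            rw [pvRepC_match _ _ _ (by decide)]
            rw [pv_shield pvK2 pvR2 (pvB1 ++ pvB2) (by decide)]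
            rw [show ∀ X : List Char, pvR2 ++ ((pvB1 ++ pvB2) ++ X) = pvK3 ++ (pvB2 ++ X) from
                  fun X => by rw [show pvK3 = pvR2 ++ pvB1 from by decide]
                              simp [List.append_assoc]]
            rw [pvRepC_match _ _ _ (by decide)]
            rw [pv_shield pvK3 pvR2 pvB2 (by decide)]
            rw [show ∀ X : List Char, pvR2 ++ (pvB2 ++ X) = pvK4 ++ X from
                  fun X => by rw [show pvK4 = pvR2 ++ pvB2 from by decide, List.append_assoc]]
            rw [pvRepC_match _ _ _ (by decide)]
          have hSt : pvS (c :: t0) = pvR2 ++ pvS t := by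
            rw [pvS_match _ _ _ (pvFM_2 g1 g2) (by simp), hts]
          rw [hCt, hSt, ih t hlen]
        · by_cases g3 : pvK21 <+: (c :: t0)
          · -- extensions/v1beta1 + beta1 at the head
            set t := List.drop pvK21.length (c :: t0) with hts
            have hl2 : pvK21 ++ t = c :: t0 := pv_prefix_append_drop g3
            have hlen : t.length ≤ n := by
              have := congrArg List.length hl2
              simp only [List.length_append, List.length_cons] at this hl
              have hkp : 0 < pvK21.length := by decide
              omega
            have hb2t : ¬ pvB2 <+: t := by
              intro hb
              apply g2
              rw [← hl2, show pvK212 = pvK21 ++ pvB2 from by decide]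
              exact (List.prefix_append_right_inj pvK21).mpr hb
            have nb2 : ¬ pvB2 <+: pvRepC pvK3 pvR2 (pvRepC pvK2 pvR2 (pvRepC pvK1 pvR1 t)) := by
              intro h
              exact hb2t (pvT0 pvK1 pvR1 (by decide) pvB2 (by decide) (by decide)
                (pvT0 pvK2 pvR2 (by decide) pvB2 (by decide) (by decide)
                  (pvT0 pvK3 pvR2 (by decide) pvB2 (by decide) (by decide) h)))
            have hCt : pvC (c :: t0) = pvR2 ++ pvC t := by
              rw [← hl2]
              unfold pvC
              rw [pv_shield pvK1 pvR1 pvK21 (by decide)]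
              rw [show ∀ X : List Char, pvK21 ++ X = pvK2 ++ (pvB1 ++ X) from
                    fun X => by rw [show pvK21 = pvK2 ++ pvB1 from by decide, List.append_assoc]]
              rw [pvRepC_match _ _ _ (by decide)]
              rw [pv_shield pvK2 pvR2 pvB1 (by decide)]
              rw [show ∀ X : List Char, pvR2 ++ (pvB1 ++ X) = pvK3 ++ X from
                    fun X => by rw [show pvK3 = pvR2 ++ pvB1 from by decide, List.append_assoc]]
              rw [pvRepC_match _ _ _ (by decide)]
              rw [pv_shield_cond pvK4 pvR2 pvR2 (by decide) _
                  (by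
                    intro h
                    rw [show pvK4 = pvR2 ++ pvB2 from by decide] at h
                    exact nb2 ((List.prefix_append_right_inj pvR2).mp h))]
            have hSt : pvS (c :: t0) = pvR2 ++ pvS t := by
              rw [pvS_match _ _ _ (pvFM_3 g1 g2 g3) (by simp), hts]
            rw [hCt, hSt, ih t hlen]
          · by_cases g4 : pvK22 <+: (c :: t0)
            · -- extensions/v1beta1 + beta2 at the head
              set t := List.drop pvK22.length (c :: t0) with hts
              have hl2 : pvK22 ++ t = c :: t0 := pv_prefix_append_drop g4
              have hlen : t.length ≤ n := by
                have := congrArg List.length hl2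
                simp only [List.length_append, List.length_cons] at this hl
                have hkp : 0 < pvK22.length := by decide
                omega
              have hCt : pvC (c :: t0) = pvR2 ++ pvC t := by
                rw [← hl2]
                unfold pvC
                rw [pv_shield pvK1 pvR1 pvK22 (by decide)]
                rw [show ∀ X : List Char, pvK22 ++ X = pvK2 ++ (pvB2 ++ X) from
                      fun X => by rw [show pvK22 = pvK2 ++ pvB2 from by decide, List.append_assoc]]
                rw [pvRepC_match _ _ _ (by decide)]
                rw [pv_shield pvK2 pvR2 pvB2 (by decide)]
                rw [show ∀ X : List Char, pvR2 ++ (pvB2 ++ X) = pvK4 ++ X from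
                      fun X => by rw [show pvK4 = pvR2 ++ pvB2 from by decide, List.append_assoc]]
                rw [pv_shield pvK3 pvR2 pvK4 (by decide)]
                rw [pvRepC_match _ _ _ (by decide)]
              have hSt : pvS (c :: t0) = pvR2 ++ pvS t := by
                rw [pvS_match _ _ _ (pvFM_4 g1 g2 g3 g4) (by simp), hts]
              rw [hCt, hSt, ih t hlen]
            · by_cases g5 : pvK2 <+: (c :: t0)
              · -- extensions/v1beta1 at the head, no cascade continuation
                set t := List.drop pvK2.length (c :: t0) with hts
                have hl2 : pvK2 ++ t = c :: t0 := pv_prefix_append_drop g5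
                have hlen : t.length ≤ n := by
                  have := congrArg List.length hl2
                  simp only [List.length_append, List.length_cons] at this hl
                  have hkp : 0 < pvK2.length := by decide
                  omega
                have hb1t : ¬ pvB1 <+: t := by
                  intro hb
                  apply g3
                  rw [← hl2, show pvK21 = pvK2 ++ pvB1 from by decide]
                  exact (List.prefix_append_right_inj pvK2).mpr hb
                have hb2t : ¬ pvB2 <+: t := by
                  intro hb
                  apply g4
                  rw [← hl2, show pvK22 = pvK2 ++ pvB2 from by decide]
                  exact (List.prefix_append_right_inj pvK2).mpr hb
                have nb1 : ¬ pvB1 <+: pvRepC pvK2 pvR2 (pvRepC pvK1 pvR1 t) := by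
                  intro h
                  exact hb1t (pvT0 pvK1 pvR1 (by decide) pvB1 (by decide) (by decide)
                    (pvT0 pvK2 pvR2 (by decide) pvB1 (by decide) (by decide) h))
                have nb2 : ¬ pvB2 <+:
                    pvRepC pvK3 pvR2 (pvRepC pvK2 pvR2 (pvRepC pvK1 pvR1 t)) := by
                  intro h
                  exact hb2t (pvT0 pvK1 pvR1 (by decide) pvB2 (by decide) (by decide)
                    (pvT0 pvK2 pvR2 (by decide) pvB2 (by decide) (by decide)
                      (pvT0 pvK3 pvR2 (by decide) pvB2 (by decide) (by decide) h)))
                have hCt : pvC (c :: t0) = pvR2 ++ pvC t := by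
                  rw [← hl2]
                  unfold pvC
                  rw [pv_shield pvK1 pvR1 pvK2 (by decide),
                      pvRepC_match _ _ _ (by decide)]
                  rw [pv_shield_cond pvK3 pvR2 pvR2 (by decide) _
                      (by
                        intro h
                        rw [show pvK3 = pvR2 ++ pvB1 from by decide] at h
                        exact nb1 ((List.prefix_append_right_inj pvR2).mp h))]
                  rw [pv_shield_cond pvK4 pvR2 pvR2 (by decide) _
                      (by
                        intro h
                        rw [show pvK4 = pvR2 ++ pvB2 from by decide] at h
                        exact nb2 ((List.prefix_append_right_inj pvR2).mp h))]
                have hSt : pvS (c :: t0) = pvR2 ++ pvS t := by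
                  rw [pvS_match _ _ _ (pvFM_5 g1 g2 g3 g4 g5) (by simp), hts]
                rw [hCt, hSt, ih t hlen]
              · by_cases g6 : pvK32 <+: (c :: t0)
                · -- apps/v1beta1 + beta2 at the head
                  set t := List.drop pvK32.length (c :: t0) with hts
                  have hl2 : pvK32 ++ t = c :: t0 := pv_prefix_append_drop g6
                  have hlen : t.length ≤ n := by
                    have := congrArg List.length hl2
                    simp only [List.length_append, List.length_cons] at this hl
                    have hkp : 0 < pvK32.length := by decide
                    omega
                  have hCt : pvC (c :: t0) = pvR2 ++ pvC t := by
                    rw [← hl2]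
                    unfold pvC
                    rw [pv_shield pvK1 pvR1 pvK32 (by decide),
                        pv_shield pvK2 pvR2 pvK32 (by decide)]
                    rw [show ∀ X : List Char, pvK32 ++ X = pvK3 ++ (pvB2 ++ X) from
                          fun X => by rw [show pvK32 = pvK3 ++ pvB2 from by decide,
                                          List.append_assoc]]
                    rw [pvRepC_match _ _ _ (by decide)]
                    rw [pv_shield pvK3 pvR2 pvB2 (by decide)]
                    rw [show ∀ X : List Char, pvR2 ++ (pvB2 ++ X) = pvK4 ++ X from
                          fun X => by rw [show pvK4 = pvR2 ++ pvB2 from by decide,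
                                          List.append_assoc]]
                    rw [pvRepC_match _ _ _ (by decide)]
                  have hSt : pvS (c :: t0) = pvR2 ++ pvS t := by
                    rw [pvS_match _ _ _ (pvFM_6 g1 g2 g3 g4 g5 g6) (by simp), hts]
                  rw [hCt, hSt, ih t hlen]
                · by_cases g7 : pvK3 <+: (c :: t0)
                  · -- apps/v1beta1 at the head, no cascade continuation
                    set t := List.drop pvK3.length (c :: t0) with hts
                    have hl2 : pvK3 ++ t = c :: t0 := pv_prefix_append_drop g7
                    have hlen : t.length ≤ n := by
                      have := congrArg List.length hl2
                      simp only [List.length_append, List.length_cons] at this hl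
                      have hkp : 0 < pvK3.length := by decide
                      omega
                    have hb2t : ¬ pvB2 <+: t := by
                      intro hb
                      apply g6
                      rw [← hl2, show pvK32 = pvK3 ++ pvB2 from by decide]
                      exact (List.prefix_append_right_inj pvK3).mpr hb
                    have nb2 : ¬ pvB2 <+:
                        pvRepC pvK3 pvR2 (pvRepC pvK2 pvR2 (pvRepC pvK1 pvR1 t)) := by
                      intro h
                      exact hb2t (pvT0 pvK1 pvR1 (by decide) pvB2 (by decide) (by decide)
                        (pvT0 pvK2 pvR2 (by decide) pvB2 (by decide) (by decide)
                          (pvT0 pvK3 pvR2 (by decide) pvB2 (by decide) (by decide) h)))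
                    have hCt : pvC (c :: t0) = pvR2 ++ pvC t := by
                      rw [← hl2]
                      unfold pvC
                      rw [pv_shield pvK1 pvR1 pvK3 (by decide),
                          pv_shield pvK2 pvR2 pvK3 (by decide),
                          pvRepC_match _ _ _ (by decide)]
                      rw [pv_shield_cond pvK4 pvR2 pvR2 (by decide) _
                          (by
                            intro h
                            rw [show pvK4 = pvR2 ++ pvB2 from by decide] at h
                            exact nb2 ((List.prefix_append_right_inj pvR2).mp h))]
                    have hSt : pvS (c :: t0) = pvR2 ++ pvS t := by
                      rw [pvS_match _ _ _ (pvFM_7 g1 g2 g3 g4 g5 g6 g7) (by simp), hts]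
                    rw [hCt, hSt, ih t hlen]
                  · by_cases g8 : pvK4 <+: (c :: t0)
                    · -- apps/v1beta2 at the head
                      set t := List.drop pvK4.length (c :: t0) with hts
                      have hl2 : pvK4 ++ t = c :: t0 := pv_prefix_append_drop g8
                      have hlen : t.length ≤ n := by
                        have := congrArg List.length hl2
                        simp only [List.length_append, List.length_cons] at this hl
                        have hkp : 0 < pvK4.length := by decide
                        omega
                      have hCt : pvC (c :: t0) = pvR2 ++ pvC t := by
                        rw [← hl2]
                        unfold pvC
                        rw [pv_shield pvK1 pvR1 pvK4 (by decide),
                            pv_shield pvK2 pvR2 pvK4 (by decide),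
                            pv_shield pvK3 pvR2 pvK4 (by decide),
                            pvRepC_match _ _ _ (by decide)]
                      have hSt : pvS (c :: t0) = pvR2 ++ pvS t := by
                        rw [pvS_match _ _ _ (pvFM_8 g1 g2 g3 g4 g5 g6 g7 g8) (by simp), hts]
                      rw [hCt, hSt, ih t hlen]
                    · -- no table entry at the head
                      have hA1 : pvRepC pvK1 pvR1 (c :: t0) = c :: pvRepC pvK1 pvR1 t0 :=
                        pvRepC_cons_neg _ _ _ _ g1
                      have nk2 : ¬ pvK2 <+: pvRepC pvK1 pvR1 (c :: t0) := by
                        intro h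
                        exact g5 (pvT0 pvK1 pvR1 (by decide) pvK2 (by decide) (by decide) h)
                      have hA2 : pvRepC pvK2 pvR2 (pvRepC pvK1 pvR1 (c :: t0)) =
                          c :: pvRepC pvK2 pvR2 (pvRepC pvK1 pvR1 t0) := by
                        rw [hA1] at nk2 ⊢
                        exact pvRepC_cons_neg _ _ _ _ nk2
                      have nk3 : ¬ pvK3 <+: pvRepC pvK2 pvR2 (pvRepC pvK1 pvR1 (c :: t0)) := by
                        intro h
                        rcases pv_transP pvK2 pvR2 pvK3 (by decide) (by decide) (by decide)
                            (by decide) (by decide) _ _ le_rfl h with hc | ⟨_, hc⟩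
                        · exact g7 (pvT0 pvK1 pvR1 (by decide) pvK3 (by decide) (by decide) hc)
                        · rw [show pvK2 ++ List.drop pvR2.length pvK3 = pvK21 from by decide] at hc
                          have := pvT0 pvK1 pvR1 (by decide) pvK21 (by decide) (by decide) hc
                          exact g5 ((show pvK2 <+: pvK21 from by decide).trans this)
                      have hA3 : pvRepC pvK3 pvR2 (pvRepC pvK2 pvR2 (pvRepC pvK1 pvR1 (c :: t0))) =
                          c :: pvRepC pvK3 pvR2 (pvRepC pvK2 pvR2 (pvRepC pvK1 pvR1 t0)) := by
                        rw [hA2] at nk3 ⊢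
                        exact pvRepC_cons_neg _ _ _ _ nk3
                      have nk4 : ¬ pvK4 <+:
                          pvRepC pvK3 pvR2 (pvRepC pvK2 pvR2 (pvRepC pvK1 pvR1 (c :: t0))) := by
                        intro h
                        rcases pv_transP pvK3 pvR2 pvK4 (by decide) (by decide) (by decide)
                            (by decide) (by decide) _ _ le_rfl h with hc | ⟨_, hc⟩
                        · rcases pv_transP pvK2 pvR2 pvK4 (by decide) (by decide) (by decide)
                              (by decide) (by decide) _ _ le_rfl hc with hcc | ⟨_, hcc⟩
                          · exact g8 (pvT0 pvK1 pvR1 (by decide) pvK4 (by decide) (by decide) hcc)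
                          · rw [show pvK2 ++ List.drop pvR2.length pvK4 = pvK22 from by decide] at hcc
                            have := pvT0 pvK1 pvR1 (by decide) pvK22 (by decide) (by decide) hcc
                            exact g5 ((show pvK2 <+: pvK22 from by decide).trans this)
                        · rw [show pvK3 ++ List.drop pvR2.length pvK4 = pvK32 from by decide] at hc
                          rcases pv_transP pvK2 pvR2 pvK32 (by decide) (by decide) (by decide)
                              (by decide) (by decide) _ _ le_rfl hc with hcc | ⟨_, hcc⟩
                          · have := pvT0 pvK1 pvR1 (by decide) pvK32 (by decide) (by decide) hcc
                            exact g7 ((show pvK3 <+: pvK32 from by decide).trans this)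
                          · rw [show pvK2 ++ List.drop pvR2.length pvK32 = pvK212 from by decide] at hcc
                            have := pvT0 pvK1 pvR1 (by decide) pvK212 (by decide) (by decide) hcc
                            exact g5 ((show pvK2 <+: pvK212 from by decide).trans this)
                      have hCt : pvC (c :: t0) = c :: pvC t0 := by
                        unfold pvC
                        rw [hA3] at nk4 ⊢
                        exact pvRepC_cons_neg _ _ _ _ nk4
                      have hSt : pvS (c :: t0) = c :: pvS t0 :=
                        pvS_none c t0 (pvFM_none g1 g2 g3 g4 g5 g6 g7 g8)
                      have hlen : t0.length ≤ n := by simpa using hl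
                      rw [hCt, hSt, ih t0 hlen]

-- ---------- bridge: under Pre_, the 8-key scan and B's 4-key scan coincide ----------
def pvNoCas (l : List Char) : Prop :=
  ¬ pvCas1 <:+: l ∧ ¬ pvCas2 <:+: l ∧ ¬ pvCas3 <:+: l

theorem pvNoCas_mono {s l : List Char} (h : s <:+: l) (hn : pvNoCas l) : pvNoCas s :=
  ⟨fun hc => hn.1 (hc.trans h), fun hc => hn.2.1 (hc.trans h), fun hc => hn.2.2 (hc.trans h)⟩

theorem pvFM_agree (s : List Char) (hn : pvNoCas s) :
    pvFirstMatch pvTable8 s = pvFirstMatch pvMigTable s := by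
  have e212 : pvK212.isPrefixOf s = false := by
    rw [Bool.eq_false_iff]; intro hb
    exact hn.1 (((show pvCas1 <+: pvK212 from by decide).trans
      (List.isPrefixOf_iff_prefix.mp hb)).isInfix)
  have e21 : pvK21.isPrefixOf s = false := by
    rw [Bool.eq_false_iff]; intro hb
    exact hn.1 ((show pvCas1 = pvK21 from by decide) ▸
      (List.isPrefixOf_iff_prefix.mp hb).isInfix)
  have e22 : pvK22.isPrefixOf s = false := by
    rw [Bool.eq_false_iff]; intro hb
    exact hn.2.1 ((show pvCas2 = pvK22 from by decide) ▸
      (List.isPrefixOf_iff_prefix.mp hb).isInfix)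
  have e32 : pvK32.isPrefixOf s = false := by
    rw [Bool.eq_false_iff]; intro hb
    exact hn.2.2 ((show pvCas3 = pvK32 from by decide) ▸
      (List.isPrefixOf_iff_prefix.mp hb).isInfix)
  simp only [pvTable8, pvMigTable, pvFirstMatch, e212, e21, e22, e32, Bool.false_eq_true,
    if_false]

theorem pv_bridge : ∀ (fuel : Nat) (l : List Char), pvNoCas l →
    pvScanGo8 fuel l = pvScanGo fuel l := by
  intro fuel
  induction fuel with
  | zero => intro l _; cases l <;> simp [pvScanGo8, pvScanGo]
  | succ n ih =>
    intro l hn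
    cases l with
    | nil => simp [pvScanGo8, pvScanGo]
    | cons c t =>
      rcases hfm : pvFirstMatch pvMigTable (c :: t) with _ | ⟨o, nw⟩
      · simp only [pvScanGo8, pvScanGo, pvFM_agree _ hn, hfm]
        rw [ih t (pvNoCas_mono (List.suffix_cons c t).isInfix hn)]
      · simp only [pvScanGo8, pvScanGo, pvFM_agree _ hn, hfm]
        rw [ih _ (pvNoCas_mono (List.drop_suffix _ _).isInfix hn)]

-- ===== VERDICT (by name: the statement is the Claim_ definition above) =====
theorem upgrade_api_versions_spec : Claim_equal_upgrade_api_versions := by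
  intro m _ hpre
  show upgrade_api_versions m = upgrade_api_versions_alt m
  rw [pv_A_eq]
  unfold upgrade_api_versions_alt
  congr 1
  rw [show pvRepC pvK4 pvR2 (pvRepC pvK3 pvR2 (pvRepC pvK2 pvR2 (pvRepC pvK1 pvR1 m.toList)))
        = pvC m.toList from rfl,
     pv_main m.toList.length m.toList le_rfl]
  exact pv_bridge m.toList.length m.toList ⟨hpre.1, hpre.2.1, hpre.2.2⟩
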